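-- pv_equiv track=rewrite | github.com/alexmotoc/AoC17 | day13/day13.py | get_shortest_delay
-- ===== SOURCE A (Python) =====
-- def get_scanner(time, height):
--     """Returns the position of the scanner in a layer with a given depth after
--     a specified number of picoseconds has passed"""
--     # Use triangle wave to determine the position
--     offset = time % ((height - 1) * 2)
--
--     if offset > height - 1:
--         position = 2 * (height - 1) - offset
--     else:
--         position = offset
--
--     return position
--
-- def get_shortest_delay(layers):
--     """Returns the shortest delay that allows the packet to run
--     through the firewall without being detected"""
--     shortest_delay = 0
--     while True:
--         severity = sum(1 for l in layers if get_scanner(shortest_delay + l, layers[l]) == 0)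
--         if severity == 0:
--             break
--         shortest_delay += 1
--     return shortest_delay
-- ===== SOURCE B (Python) =====
-- def get_shortest_delay(layers):
--     """Returns the shortest delay that allows the packet to run
--     through the firewall without being detected"""
--     # Event sweep over the union of arithmetic progressions of catch times.
--     # A layer of range h >= 2 at depth d catches the packet exactly at delays
--     # congruent to -d modulo 2*(h-1); keep, for every such layer, its NEXT
--     # catch time, and sweep the delays: whenever a layer's event fires at the
--     # current delay, push it forward by its period.  The first delay at which
--     # no event fires is the answer.  No scanner position (and no division) is
--     # ever recomputed inside the sweep: events only advance additively.
--     events = []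
--     for depth, height in layers.items():
--         period = (height - 1) * 2
--         if period > 0:
--             events.append([(-depth) % period, period])
--     delay = 0
--     while True:
--         fired = False
--         for ev in events:
--             if ev[0] == delay:
--                 ev[0] += ev[1]
--                 fired = True
--         if not fired:
--             return delay
--         delay += 1
-- ===== Notes on version B (the rewrite author's own statement) =====
-- stated objective: alternative
-- what changed: B replaces A's per-delay recomputation of every layer's triangle-wave scanner position (with a dict lookup and floor-mod per layer per delay) by an incremental event sweep: each catching-capable layer keeps its next catch time, advanced additively by its period when it fires, and the answer is the first delay at which no event fires.
import Mathlib
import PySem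

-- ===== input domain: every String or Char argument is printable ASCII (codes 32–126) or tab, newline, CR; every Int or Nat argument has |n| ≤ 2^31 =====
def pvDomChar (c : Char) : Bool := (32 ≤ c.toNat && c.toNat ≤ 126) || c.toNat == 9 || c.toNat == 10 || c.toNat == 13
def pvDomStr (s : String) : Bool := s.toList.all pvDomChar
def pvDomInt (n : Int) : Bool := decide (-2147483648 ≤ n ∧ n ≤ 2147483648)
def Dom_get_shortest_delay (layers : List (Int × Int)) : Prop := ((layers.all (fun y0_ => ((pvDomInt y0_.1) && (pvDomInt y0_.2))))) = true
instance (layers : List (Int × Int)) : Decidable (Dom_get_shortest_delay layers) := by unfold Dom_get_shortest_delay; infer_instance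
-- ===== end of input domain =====

-- B replaces A's per-delay triangle-wave recomputation by an event sweep: every catching-capable
-- layer keeps its next catch time, advanced additively by its period when it fires.
-- ===== PORT A =====
-- triangle-wave scanner position (get_scanner in the Python)
def pvScanner (time height : Int) : Int :=
  let offset := PySem.Int.mod time ((height - 1) * 2)
  if offset > height - 1 then 2 * (height - 1) - offset else offset

-- dict access layers[l]: first-match association lookup (keys of a Python dict are unique)
def pvLookup : List (Int × Int) → Int → Int
  | [], _ => 0
  | q :: rest, k => if q.1 == k then q.2 else pvLookup rest k

-- sum(1 for l in layers if get_scanner(shortest_delay + l, layers[l]) == 0)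
def pvSeverity (layers : List (Int × Int)) (delay : Int) : Int :=
  layers.foldl (fun acc pr =>
    if pvScanner (delay + pr.1) (pvLookup layers pr.1) = 0 then acc + 1 else acc) 0

-- fuel bound for the 'while True' loops (totality guard only: lcm of the scanner periods)
def pvFuel (layers : List (Int × Int)) : Nat :=
  layers.foldl (fun acc pr => if 2 ≤ pr.2 then Nat.lcm acc (2 * (pr.2 - 1)).toNat else acc) 1

def pvLoopA (layers : List (Int × Int)) : Nat → Int → Int
  | 0, delay => delay
  | fuel + 1, delay =>
      if pvSeverity layers delay = 0 then delay else pvLoopA layers fuel (delay + 1)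

def get_shortest_delay (layers : List (Int × Int)) : Int :=
  pvLoopA layers (pvFuel layers) 0

-- ===== PORT B =====
-- the events list built by B's first for-loop: [first catch time, period] per catching layer
def pvInitEvents (layers : List (Int × Int)) : List (Int × Int) :=
  layers.foldl (fun acc pr =>
    if 0 < (pr.2 - 1) * 2 then
      acc ++ [(PySem.Int.mod (-pr.1) ((pr.2 - 1) * 2), (pr.2 - 1) * 2)] else acc) []

-- B's sweep body mutates `events` in place and sets `fired`; ported as the pair
-- (any ev fires, the same list with every firing event advanced by its period)
def pvFired (events : List (Int × Int)) (delay : Int) : Bool :=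
  events.any (fun ev => ev.1 == delay)

def pvAdvance (events : List (Int × Int)) (delay : Int) : List (Int × Int) :=
  events.map (fun ev => if ev.1 == delay then (ev.1 + ev.2, ev.2) else ev)

def pvLoopB : Nat → List (Int × Int) → Int → Int
  | 0, _, delay => delay
  | fuel + 1, events, delay =>
      if pvFired events delay then pvLoopB fuel (pvAdvance events delay) (delay + 1) else delay

def get_shortest_delay_alt (layers : List (Int × Int)) : Int :=
  pvLoopB (pvFuel layers) (pvInitEvents layers) 0

-- ===== PRECONDITION & SPEC =====
-- Pre_ excludes layers of range exactly 1, on which A raises ZeroDivisionError, and lists with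
-- duplicate depths, which cannot arise from the Python dict argument.
def Pre_get_shortest_delay (layers : List (Int × Int)) : Prop :=
  (∀ pr ∈ layers, pr.2 ≠ 1) ∧ (layers.map Prod.fst).Nodup
instance (layers : List (Int × Int)) : Decidable (Pre_get_shortest_delay layers) := by
  unfold Pre_get_shortest_delay; infer_instance

def pvWitness_get_shortest_delay : (List (Int × Int)) := [(0, 3), (1, 2)]

def Spec_get_shortest_delay (layers : List (Int × Int)) (out : Int) : Prop :=
  out = get_shortest_delay_alt layers
instance (layers : List (Int × Int)) (out : Int) : Decidable (Spec_get_shortest_delay layers out) := by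
  unfold Spec_get_shortest_delay; infer_instance

-- ===== CLAIM (what is proved, stated in full; the proofs are below) =====
def Claim_equal_get_shortest_delay : Prop :=
  ∀ (layers : List (Int × Int)), Dom_get_shortest_delay layers →
    Pre_get_shortest_delay layers →
    Spec_get_shortest_delay layers (get_shortest_delay layers)

-- ===== LEMMAS AND PROOFS =====

-- the catching-capable layers, and B's event built from one of them
def pvActiveLayers (layers : List (Int × Int)) : List (Int × Int) :=
  layers.filter (fun pr => decide (0 < (pr.2 - 1) * 2))

def pvMkEvent (pr : Int × Int) : Int × Int :=
  (PySem.Int.mod (-pr.1) ((pr.2 - 1) * 2), (pr.2 - 1) * 2)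

-- sweep invariant: events pair up with the catching layers; each holds its period and the
-- least catch time of its progression that is ≥ delay
def pvInv (layers : List (Int × Int)) (delay : Int) (events : List (Int × Int)) : Prop :=
  List.Forall₂ (fun pr ev =>
    0 < ev.2 ∧ ev.2 = (pr.2 - 1) * 2 ∧
    PySem.Int.mod ev.1 ev.2 = PySem.Int.mod (-pr.1) ev.2 ∧
    delay ≤ ev.1 ∧ ev.1 < delay + ev.2) (pvActiveLayers layers) events

-- the scanner is at position 0 exactly when the layer can catch (height ≥ 2) and the
-- period 2*(height-1) divides the time
lemma pvScanner_eq_zero_iff (t h : Int) (hh : h ≠ 1) :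
    pvScanner t h = 0 ↔ (2 ≤ h ∧ PySem.Int.mod t (2 * (h - 1)) = 0) := by
  simp only [pvScanner]
  by_cases h2 : 2 ≤ h
  · have hm : (0 : Int) < (h - 1) * 2 := by omega
    have h0 := PySem.Int.mod_nonneg t hm
    have hlt := PySem.Int.mod_lt t hm
    have : 2 * (h - 1) = (h - 1) * 2 := by ring
    rw [this]
    split_ifs with hgt <;> omega
  · have hle : h ≤ 0 := by omega
    have hm : (h - 1) * 2 < 0 := by omega
    have hb := PySem.Int.mod_neg_bounds t hm
    split_ifs with hgt <;> omega

-- first-match lookup of a present key returns its value when the keys are distinct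
lemma pvLookup_mem (layers : List (Int × Int)) (hnd : (layers.map Prod.fst).Nodup)
    (pr : Int × Int) (hm : pr ∈ layers) : pvLookup layers pr.1 = pr.2 := by
  induction layers with
  | nil => cases hm
  | cons q rest ih =>
    simp only [List.map_cons, List.nodup_cons, List.mem_map] at hnd
    rcases List.mem_cons.mp hm with h | h
    · subst h; simp [pvLookup]
    · have hne : (q.1 == pr.1) = false := by
        apply beq_false_of_ne
        intro he
        exact hnd.1 ⟨pr, h, he.symm⟩
      simp [pvLookup, hne]
      exact ih hnd.2 h

-- A's severity is 0 exactly when no layer's scanner is at 0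
lemma pvSeverity_eq_zero_iff (layers : List (Int × Int))
    (hnd : (layers.map Prod.fst).Nodup) (delay : Int) :
    pvSeverity layers delay = 0 ↔ ∀ pr ∈ layers, pvScanner (delay + pr.1) pr.2 ≠ 0 := by
  unfold pvSeverity
  rw [PySem.List.foldl_congr_mem layers _
      (fun acc pr => if pvScanner (delay + pr.1) pr.2 = 0 then acc + 1 else acc) 0
      (fun acc pr hpr => by rw [pvLookup_mem layers hnd pr hpr])]
  simp only [PySem.List.foldl_ite_add_one, zero_add, Nat.cast_eq_zero, List.countP_eq_zero,
    decide_eq_true_eq, ne_eq]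

-- congruence form of the catch condition, for a positive period
lemma pvMod_shift (d k p : Int) (hp : 0 < p) :
    PySem.Int.mod (d + k) p = 0 ↔ PySem.Int.mod d p = PySem.Int.mod (-k) p := by
  rw [PySem.Int.mod_eq_emod_of_pos hp, PySem.Int.mod_eq_emod_of_pos hp,
      PySem.Int.mod_eq_emod_of_pos hp,
      Int.emod_eq_emod_iff_emod_sub_eq_zero, sub_neg_eq_add]

-- moving an event one period forward keeps its residue
lemma pvMod_add_self (t p : Int) (hp : 0 < p) :
    PySem.Int.mod (t + p) p = PySem.Int.mod t p := by
  rw [PySem.Int.mod_eq_emod_of_pos hp, PySem.Int.mod_eq_emod_of_pos hp,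
      (Int.emod_eq_add_self_emod).symm]

-- transfer a universal statement across the Forall₂ pairing of layers and events
lemma pvForall₂_iff {α β : Type} {R : α → β → Prop} {P : α → Prop} {Q : β → Prop}
    {l1 : List α} {l2 : List β} (h : List.Forall₂ R l1 l2)
    (hiff : ∀ a b, R a b → (P a ↔ Q b)) :
    (∀ a ∈ l1, P a) ↔ (∀ b ∈ l2, Q b) := by
  induction h with
  | nil => simp
  | @cons a b l1' l2' hrel _ ih =>
    simp only [List.mem_cons, forall_eq_or_imp]
    rw [hiff a b hrel, ih]

-- an event in its window fires exactly when the current delay is a catch time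
lemma pvHit_iff (t p delay r : Int) (hp : 0 < p)
    (hr : PySem.Int.mod t p = r) (hlo : delay ≤ t) (hhi : t < delay + p) :
    t = delay ↔ PySem.Int.mod delay p = r := by
  constructor
  · rintro rfl; exact hr
  · intro hd
    have hmod : PySem.Int.mod delay p = PySem.Int.mod t p := by rw [hd, hr]
    rw [PySem.Int.mod_eq_emod_of_pos hp, PySem.Int.mod_eq_emod_of_pos hp] at hmod
    have hdvd : p ∣ t - delay := by
      have := Int.emod_eq_emod_iff_emod_sub_eq_zero.mp hmod.symm
      exact Int.dvd_of_emod_eq_zero this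
    rcases hdvd with ⟨k, hk⟩
    have hk0 : k = 0 := by
      rcases lt_trichotomy k 0 with h | h | h
      · nlinarith
      · exact h
      · nlinarith
    rw [hk0, mul_zero] at hk
    omega

-- the initial events satisfy the invariant at delay 0
lemma pvInitEvents_eq (layers : List (Int × Int)) :
    pvInitEvents layers = (pvActiveLayers layers).map pvMkEvent := by
  unfold pvInitEvents pvActiveLayers pvMkEvent
  exact PySem.List.foldl_append_ite
    (fun pr : Int × Int => 0 < (pr.2 - 1) * 2)
    (fun pr : Int × Int => (PySem.Int.mod (-pr.1) ((pr.2 - 1) * 2), (pr.2 - 1) * 2)) layers []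

lemma pvInv_init (layers : List (Int × Int)) : pvInv layers 0 (pvInitEvents layers) := by
  rw [pvInitEvents_eq]
  unfold pvInv
  rw [List.forall₂_map_right_iff, List.forall₂_same]
  intro pr hpr
  have hp : 0 < (pr.2 - 1) * 2 := by
    simp only [pvActiveLayers, List.mem_filter, decide_eq_true_eq] at hpr
    exact hpr.2
  have h0 := PySem.Int.mod_nonneg (-pr.1) hp
  have hlt := PySem.Int.mod_lt (-pr.1) hp
  simp only [pvMkEvent]
  refine ⟨hp, ?_, ?_, by omega, by omega⟩
  · trivial
  rw [PySem.Int.mod_eq_emod_of_pos (a := PySem.Int.mod (-pr.1) ((pr.2 - 1) * 2)) hp]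
  exact Int.emod_eq_of_lt h0 hlt

-- the invariant is preserved by one sweep step
lemma pvInv_advance (layers : List (Int × Int)) (delay : Int) (events : List (Int × Int))
    (hinv : pvInv layers delay events) :
    pvInv layers (delay + 1) (pvAdvance events delay) := by
  unfold pvInv pvAdvance at *
  rw [List.forall₂_map_right_iff]
  refine List.Forall₂.imp ?_ hinv
  intro pr ev hrel
  obtain ⟨hp, hper, hmod, hlo, hhi⟩ := hrel
  by_cases ht : ev.1 = delay
  · rw [if_pos (beq_iff_eq.mpr ht)]
    exact ⟨hp, hper,
      show PySem.Int.mod (ev.1 + ev.2) ev.2 = PySem.Int.mod (-pr.1) ev.2 from by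
        rw [pvMod_add_self _ _ hp]; exact hmod,
      show delay + 1 ≤ ev.1 + ev.2 from by omega,
      show ev.1 + ev.2 < delay + 1 + ev.2 from by omega⟩
  · rw [if_neg (by simp [beq_false_of_ne ht])]
    exact ⟨hp, hper, hmod, by omega, by omega⟩

-- under the invariant A's loop test and B's agree at the current delay
lemma pvCond_iff (layers : List (Int × Int))
    (h1 : ∀ pr ∈ layers, pr.2 ≠ 1) (hnd : (layers.map Prod.fst).Nodup)
    (delay : Int) (events : List (Int × Int)) (hinv : pvInv layers delay events) :
    (pvSeverity layers delay = 0) ↔ pvFired events delay = false := by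
  rw [pvSeverity_eq_zero_iff layers hnd delay]
  unfold pvFired
  rw [List.any_eq_false]
  -- reduce the left side to a statement over the active layers
  have hLeft : (∀ pr ∈ layers, pvScanner (delay + pr.1) pr.2 ≠ 0) ↔
      (∀ pr ∈ pvActiveLayers layers, PySem.Int.mod (delay + pr.1) ((pr.2 - 1) * 2) ≠ 0) := by
    constructor
    · intro h pr hpr hm
      simp only [pvActiveLayers, List.mem_filter, decide_eq_true_eq] at hpr
      apply h pr hpr.1
      rw [pvScanner_eq_zero_iff _ _ (h1 pr hpr.1)]
      refine ⟨by omega, ?_⟩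
      have : 2 * (pr.2 - 1) = (pr.2 - 1) * 2 := by ring
      rw [this]; exact hm
    · intro h pr hpr h0
      rw [pvScanner_eq_zero_iff _ _ (h1 pr hpr)] at h0
      obtain ⟨h2, hm⟩ := h0
      refine h pr ?_ ?_
      · simp only [pvActiveLayers, List.mem_filter, decide_eq_true_eq]
        exact ⟨hpr, by omega⟩
      · have : (pr.2 - 1) * 2 = 2 * (pr.2 - 1) := by ring
        rw [this]; exact hm
  rw [hLeft]
  -- transfer across the Forall₂ pairing
  unfold pvInv at hinv
  apply pvForall₂_iff hinv
  intro pr ev hrel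
  obtain ⟨hp, hper, hmod, hlo, hhi⟩ := hrel
  have hp' : 0 < (pr.2 - 1) * 2 := hper ▸ hp
  constructor
  · intro hne hb
    have ht : ev.1 = delay := beq_iff_eq.mp hb
    have hc := (pvHit_iff ev.1 ev.2 delay _ hp hmod hlo hhi).mp ht
    rw [hper] at hc
    exact hne ((pvMod_shift delay pr.1 _ hp').mpr hc)
  · intro hb hm
    have hcong : PySem.Int.mod delay ev.2 = PySem.Int.mod (-pr.1) ev.2 := by
      rw [hper]; exact (pvMod_shift delay pr.1 _ hp').mp hm
    have ht : ev.1 = delay := (pvHit_iff ev.1 ev.2 delay _ hp hmod hlo hhi).mpr hcong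
    exact hb (beq_iff_eq.mpr ht)

-- the two loops agree step for step under the invariant
lemma pvLoops_eq (layers : List (Int × Int))
    (h1 : ∀ pr ∈ layers, pr.2 ≠ 1) (hnd : (layers.map Prod.fst).Nodup) :
    ∀ (fuel : Nat) (delay : Int) (events : List (Int × Int)),
      pvInv layers delay events →
      pvLoopA layers fuel delay = pvLoopB fuel events delay := by
  intro fuel
  induction fuel with
  | zero => intro delay events _; rfl
  | succ n ih =>
    intro delay events hinv
    have hc := pvCond_iff layers h1 hnd delay events hinv
    simp only [pvLoopA, pvLoopB]
    by_cases hs : pvSeverity layers delay = 0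
    · rw [if_pos hs, hc.mp hs]
      simp
    · have hf : pvFired events delay = true := by
        cases h : pvFired events delay
        · exact absurd (hc.mpr h) hs
        · rfl
      rw [if_neg hs, hf, if_pos rfl]
      exact ih (delay + 1) (pvAdvance events delay) (pvInv_advance layers delay events hinv)

-- ===== VERDICT (by name: the statement is the Claim_ definition above) =====
theorem get_shortest_delay_spec : Claim_equal_get_shortest_delay := by
  intro layers _ hpre
  unfold Spec_get_shortest_delay get_shortest_delay get_shortest_delay_alt
  exact pvLoops_eq layers hpre.1 hpre.2 (pvFuel layers) 0 (pvInitEvents layers)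
    (pvInv_init layers)
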